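-- pv_equiv track=rewrite | github.com/nafisaumarvm/YAP | streamlit_app.py | split_into_levels
-- ===== SOURCE A (Python) =====
-- LEVELS = ("Level One", "Level Two", "Level Three")
--
-- def split_into_levels(questions: list[str]) -> dict[str, list[str]]:
--     if not questions:
--         return {level: [] for level in LEVELS}
--
--     per_level = len(questions) // len(LEVELS)
--     extras = len(questions) % len(LEVELS)
--
--     levels: dict[str, list[str]] = {}
--     start = 0
--     for idx, level in enumerate(LEVELS):
--         stop = start + per_level + (1 if idx < extras else 0)
--         levels[level] = questions[start:stop]
--         start = stop
--     return levels
-- ===== SOURCE B (Python) =====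
-- LEVELS = ("Level One", "Level Two", "Level Three")
--
-- def split_into_levels(questions: list[str]) -> dict[str, list[str]]:
--     n = len(questions)
--     buckets = {level: [] for level in LEVELS}
--     for i, q in enumerate(questions):
--         buckets[LEVELS[3 * i // n]].append(q)
--     return buckets
-- ===== Notes on version B (the rewrite author's own statement) =====
-- stated objective: alternative
-- what changed: A computes slice boundaries level by level and assigns contiguous slices; B makes one pass over the questions, routing each element at index i to bucket 3*i//n of a pre-initialized dict.
import Mathlib
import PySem

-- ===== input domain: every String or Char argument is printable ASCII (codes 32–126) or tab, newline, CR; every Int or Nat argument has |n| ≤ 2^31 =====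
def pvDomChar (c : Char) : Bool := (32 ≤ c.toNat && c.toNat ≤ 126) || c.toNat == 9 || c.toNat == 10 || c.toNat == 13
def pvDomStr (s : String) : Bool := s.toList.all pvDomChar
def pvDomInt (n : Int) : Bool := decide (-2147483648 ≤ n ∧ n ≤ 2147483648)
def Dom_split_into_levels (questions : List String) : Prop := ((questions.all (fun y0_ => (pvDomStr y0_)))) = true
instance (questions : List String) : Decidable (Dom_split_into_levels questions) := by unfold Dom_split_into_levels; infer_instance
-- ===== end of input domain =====

-- B replaces A's level-by-level slice-boundary accumulation by a single pass over the
-- questions that routes element i to bucket 3*i//n (alternative decomposition, same cost).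

-- ===== PORT A =====
def split_into_levels (questions : List String) : List (String × List String) :=
  if questions = [] then
    (PySem.Dict.mk [("Level One", []), ("Level Two", []), ("Level Three", [])]).items
  else
    let per : Int := PySem.Int.floordiv (PySem.List.len questions) 3
    let extras : Int := PySem.Int.mod (PySem.List.len questions) 3
    let r := (PySem.List.enumerate ["Level One", "Level Two", "Level Three"] 0).foldl
      (fun (st : PySem.Dict String (List String) × Int) p =>
        let stop := st.2 + per + (if p.1 < extras then 1 else 0)
        (PySem.Dict.insert st.1 p.2 (PySem.List.slice questions (some st.2) (some stop)), stop))
      ((PySem.Dict.mk []), 0)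
    r.1.items

-- ===== PORT B =====
-- LEVELS[j] for the in-range indices 0,1,2 produced by 3*i//n
def pvLevelName (j : Int) : String :=
  if j = 0 then "Level One" else if j = 1 then "Level Two" else "Level Three"

def split_into_levels_alt (questions : List String) : List (String × List String) :=
  let n : Int := PySem.List.len questions
  let init : PySem.Dict String (List String) :=
    PySem.Dict.mk [("Level One", []), ("Level Two", []), ("Level Three", [])]
  ((PySem.List.enumerate questions 0).foldl
    (fun d p =>
      PySem.Dict.modify d (pvLevelName (PySem.Int.floordiv (3 * p.1) n)) [] (fun l => l ++ [p.2]))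
    init).items

-- ===== PRECONDITION & SPEC =====
def Spec_split_into_levels (questions : List String) (out : List (String × List String)) : Prop := out = split_into_levels_alt questions
instance (questions : List String) (out : List (String × List String)) : Decidable (Spec_split_into_levels questions out) := by unfold Spec_split_into_levels; infer_instance

-- ===== CLAIM (what is proved, stated in full; the proofs are below) =====
def Claim_equal_split_into_levels : Prop := ∀ (questions : List String), Dom_split_into_levels questions → Spec_split_into_levels questions (split_into_levels questions)

-- ===== LEMMAS AND PROOFS =====

-- slice boundary of bucket j in A: j*(n/3) + min (n%3) j
def pvC (n j : Nat) : Nat := j * (n / 3) + min (n % 3) j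

-- the routing formula lands in bucket j exactly on A's j-th index interval
lemma pv_route (n i j : Nat) (hn : 0 < n) (hi : i < n) (hj : j < 3) :
    3 * i / n = j ↔ (pvC n j ≤ i ∧ i < pvC n (j + 1)) := by
  have h1 := Nat.div_add_mod (3 * i) n
  have h2 : 3 * i % n < n := Nat.mod_lt _ hn
  have h3 : 3 * i / n < 3 := Nat.div_lt_of_lt_mul (by omega)
  unfold pvC
  set q := 3 * i / n with hq
  interval_cases j <;> interval_cases q <;> omega

lemma pv_mod1 (a b c v : List String) (k : String) (hk : k = "Level One") :
    (PySem.Dict.mk [("Level One", a), ("Level Two", b), ("Level Three", c)]).modify k []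
      (fun l => l ++ v)
    = PySem.Dict.mk [("Level One", a ++ v), ("Level Two", b), ("Level Three", c)] := by
  subst hk
  simp [PySem.Dict.modify, PySem.Dict.insert, PySem.Dict.getD, PySem.Dict.get?, PySem.Dict.contains]

lemma pv_mod2 (a b c v : List String) (k : String) (hk : k = "Level Two") :
    (PySem.Dict.mk [("Level One", a), ("Level Two", b), ("Level Three", c)]).modify k []
      (fun l => l ++ v)
    = PySem.Dict.mk [("Level One", a), ("Level Two", b ++ v), ("Level Three", c)] := by
  subst hk
  simp [PySem.Dict.modify, PySem.Dict.insert, PySem.Dict.getD, PySem.Dict.get?, PySem.Dict.contains]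

lemma pv_mod3 (a b c v : List String) (k : String) (hk : k = "Level Three") :
    (PySem.Dict.mk [("Level One", a), ("Level Two", b), ("Level Three", c)]).modify k []
      (fun l => l ++ v)
    = PySem.Dict.mk [("Level One", a), ("Level Two", b), ("Level Three", c ++ v)] := by
  subst hk
  simp [PySem.Dict.modify, PySem.Dict.insert, PySem.Dict.getD, PySem.Dict.get?, PySem.Dict.contains]

-- B's loop appends each routed element to its bucket of the 3-key dict
lemma pv_loop (g : Int × String → String)
    (hg : ∀ p, g p = "Level One" ∨ g p = "Level Two" ∨ g p = "Level Three") :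
    ∀ (ps : List (Int × String)) (a b c : List String),
    ps.foldl (fun d p => PySem.Dict.modify d (g p) [] (fun l => l ++ [p.2]))
      (PySem.Dict.mk [("Level One", a), ("Level Two", b), ("Level Three", c)])
    = PySem.Dict.mk
      [("Level One", a ++ (ps.filter (fun p => g p == "Level One")).map (·.2)),
       ("Level Two",  b ++ (ps.filter (fun p => g p == "Level Two")).map (·.2)),
       ("Level Three", c ++ (ps.filter (fun p => g p == "Level Three")).map (·.2))] := by
  intro ps
  induction ps with
  | nil => intro a b c; simp
  | cons p ps ih =>
    intro a b c
    rcases hg p with h | h | h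
    · rw [List.foldl_cons, pv_mod1 _ _ _ _ _ h, ih]
      simp [h]
    · rw [List.foldl_cons, pv_mod2 _ _ _ _ _ h, ih]
      simp [h]
    · rw [List.foldl_cons, pv_mod3 _ _ _ _ _ h, ih]
      simp [h]

-- an index-interval filter of an enumeration is a take/drop
lemma pv_filt {α : Type} (lo hi : Nat) :
    ∀ (l : List α) (k : Nat),
    ((PySem.List.enumerate l (k : Int)).filter
        (fun q => decide ((lo : Int) ≤ q.1) && decide (q.1 < (hi : Int)))).map (·.2)
    = (l.take (hi - k)).drop (lo - k) := by
  intro l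
  induction l with
  | nil => intro k; simp [PySem.List.enumerate_nil]
  | cons x xs ih =>
    intro k
    rw [PySem.List.enumerate_cons, List.filter_cons]
    have hk1 : (k : Int) + 1 = ((k + 1 : Nat) : Int) := by push_cast; ring
    by_cases h : lo ≤ k ∧ k < hi
    · rw [if_pos (by simp; constructor <;> [exact_mod_cast h.1; exact_mod_cast h.2])]
      rw [List.map_cons, hk1, ih]
      rw [show hi - k = (hi - (k+1)) + 1 by omega, show lo - k = 0 by omega]
      simp [show lo - (k+1) = 0 by omega]
    · rw [if_neg (by simp; intro h1; omega)]
      rw [hk1, ih]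
      rcases Nat.lt_or_ge k hi with hkhi | hkhi
      · rw [show hi - k = (hi - (k+1)) + 1 by omega, show lo - k = (lo - (k+1)) + 1 by omega]
        simp [List.take_succ_cons]
      · rw [show hi - k = 0 by omega, show hi - (k+1) = 0 by omega]
        simp

-- A's result is the three contiguous pvC-bounded segments
lemma pv_A (questions : List String) (hq : questions ≠ []) :
    split_into_levels questions =
      [("Level One", (questions.take (pvC questions.length 1)).drop (pvC questions.length 0)),
       ("Level Two", (questions.take (pvC questions.length 2)).drop (pvC questions.length 1)),
       ("Level Three", (questions.take (pvC questions.length 3)).drop (pvC questions.length 2))] := by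
  have hb : ∀ (a b : Int) (a' b' : Nat), a = ((a' : Nat) : Int) → b = ((b' : Nat) : Int) →
      PySem.List.slice questions (some a) (some b) = (questions.take b').drop a' := by
    intro a b a' b' ha hbb
    subst ha; subst hbb
    rw [PySem.List.slice_natCast, List.drop_take]
  have hf : PySem.Int.floordiv (↑questions.length) 3 = ((questions.length / 3 : Nat) : Int) := by
    exact_mod_cast PySem.Int.floordiv_natCast questions.length 3
  have hm : PySem.Int.mod (↑questions.length) 3 = ((questions.length % 3 : Nat) : Int) := by
    exact_mod_cast PySem.Int.mod_natCast questions.length 3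
  unfold split_into_levels
  rw [if_neg hq]
  simp only [PySem.List.enumerate_cons, PySem.List.enumerate_nil, List.foldl_cons, List.foldl_nil,
    PySem.List.len_eq, hf, hm]
  rw [hb _ _ (pvC questions.length 0) (pvC questions.length 1)
        (by simp [pvC]) (by simp only [pvC]; push_cast; split_ifs <;> omega),
      hb _ _ (pvC questions.length 1) (pvC questions.length 2)
        (by simp only [pvC]; push_cast; split_ifs <;> omega)
        (by simp only [pvC]; push_cast; split_ifs <;> omega),
      hb _ _ (pvC questions.length 2) (pvC questions.length 3)
        (by simp only [pvC]; push_cast; split_ifs <;> omega)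
        (by simp only [pvC]; push_cast; split_ifs <;> omega)]
  simp [PySem.Dict.insert, PySem.Dict.contains]

-- names of distinct in-range bucket indices compare like the indices
lemma pv_name_eq (m j : Nat) (hm : m < 3) (hj : j < 3) :
    (pvLevelName ((m : Nat) : Int) == pvLevelName ((j : Nat) : Int)) = decide (m = j) := by
  interval_cases m <;> interval_cases j <;> decide

-- B's filter for bucket j is A's j-th segment
lemma pv_bucket (questions : List String) (hq : questions ≠ []) (j : Nat) (hj : j < 3) :
    ((PySem.List.enumerate questions 0).filter
        (fun p => pvLevelName (PySem.Int.floordiv (3 * p.1) (PySem.List.len questions))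
                    == pvLevelName ((j : Nat) : Int))).map (·.2)
    = (questions.take (pvC questions.length (j + 1))).drop (pvC questions.length j) := by
  have hn : 0 < questions.length := List.length_pos_iff.mpr hq
  have hcongr : ∀ p ∈ PySem.List.enumerate questions 0,
      (pvLevelName (PySem.Int.floordiv (3 * p.1) (PySem.List.len questions))
         == pvLevelName ((j : Nat) : Int))
      = (decide ((pvC questions.length j : Nat) ≤ p.1)
          && decide (p.1 < ((pvC questions.length (j + 1) : Nat) : Int))) := by
    intro p hp
    rcases (PySem.List.mem_enumerate_iff _ _ _).mp hp with ⟨k, hk, hpk⟩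
    subst hpk
    simp only [PySem.List.len_eq]
    rw [show (0 : Int) + (k : Nat) = ((k : Nat) : Int) by ring]
    rw [show (3 : Int) * ((k : Nat) : Int) = ((3 * k : Nat) : Int) by push_cast; ring]
    rw [PySem.Int.floordiv_natCast]
    have h3 : 3 * k / questions.length < 3 :=
      Nat.div_lt_of_lt_mul (by omega)
    rw [pv_name_eq _ _ h3 hj]
    have hroute := pv_route questions.length k j hn hk hj
    have hcast1 : (decide (((pvC questions.length j : Nat) : Int) ≤ ((k : Nat) : Int)))
        = decide (pvC questions.length j ≤ k) := by simp
    have hcast2 : (decide (((k : Nat) : Int) < ((pvC questions.length (j + 1) : Nat) : Int)))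
        = decide (k < pvC questions.length (j + 1)) := by simp
    rw [hcast1, hcast2, ← Bool.decide_and, decide_eq_decide]
    exact hroute
  rw [List.filter_congr hcongr]
  have h0 : (0 : Int) = ((0 : Nat) : Int) := by norm_num
  rw [h0, pv_filt (pvC questions.length j) (pvC questions.length (j + 1)) questions 0]
  simp

-- ===== VERDICT (by name: the statement is the Claim_ definition above) =====
theorem split_into_levels_spec : Claim_equal_split_into_levels := by
  intro questions _
  unfold Spec_split_into_levels
  by_cases hq : questions = []
  · subst hq; rfl
  · have hg : ∀ p : Int × String,
        pvLevelName (PySem.Int.floordiv (3 * p.1) (PySem.List.len questions)) = "Level One" ∨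
        pvLevelName (PySem.Int.floordiv (3 * p.1) (PySem.List.len questions)) = "Level Two" ∨
        pvLevelName (PySem.Int.floordiv (3 * p.1) (PySem.List.len questions)) = "Level Three" := by
      intro p
      unfold pvLevelName
      split_ifs <;> tauto
    show split_into_levels questions =
      ((PySem.List.enumerate questions 0).foldl
        (fun d p =>
          PySem.Dict.modify d
            (pvLevelName (PySem.Int.floordiv (3 * p.1) (PySem.List.len questions))) []
            (fun l => l ++ [p.2]))
        (PySem.Dict.mk [("Level One", []), ("Level Two", []), ("Level Three", [])])).items
    rw [pv_loop _ hg (PySem.List.enumerate questions 0) [] [] []]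
    have b0 := pv_bucket questions hq 0 (by omega)
    have b1 := pv_bucket questions hq 1 (by omega)
    have b2 := pv_bucket questions hq 2 (by omega)
    rw [show pvLevelName ((0 : Nat) : Int) = "Level One" by decide] at b0
    rw [show pvLevelName ((1 : Nat) : Int) = "Level Two" by decide] at b1
    rw [show pvLevelName ((2 : Nat) : Int) = "Level Three" by decide] at b2
    rw [pv_A questions hq]
    simp only [List.nil_append]
    rw [b0, b1, b2]
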